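-- pv_equiv track=rewrite | github.com/soundmind1999-dotcom/Phase-Gate | Python/Gate Four/level9_task.py | replace_non_squares
-- ===== SOURCE A (Python) =====
-- def replace_non_squares(numbers):
--     for index in range(len(numbers)):
--         is_square = False
--
--         for value in range(numbers[index] + 1):
--             if value * value == numbers[index]:
--                 is_square = True
--
--         if not is_square:
--             numbers[index] = -1
--
--     return numbers
-- ===== SOURCE B (Python) =====
-- def replace_non_squares(numbers):
--     if not numbers:
--         return numbers
--     m = max(numbers)
--     squares = set()
--     i = 0
--     while i * i <= m:
--         squares.add(i * i)
--         i += 1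
--     numbers[:] = [x if x in squares else -1 for x in numbers]
--     return numbers
-- ===== Notes on version B (the rewrite author's own statement) =====
-- stated objective: faster
-- what changed: Instead of scanning all candidates 0..n for every element, B computes the maximum once, precomputes the set of all perfect squares up to it, and rewrites the list in a single membership pass.
import Mathlib
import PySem

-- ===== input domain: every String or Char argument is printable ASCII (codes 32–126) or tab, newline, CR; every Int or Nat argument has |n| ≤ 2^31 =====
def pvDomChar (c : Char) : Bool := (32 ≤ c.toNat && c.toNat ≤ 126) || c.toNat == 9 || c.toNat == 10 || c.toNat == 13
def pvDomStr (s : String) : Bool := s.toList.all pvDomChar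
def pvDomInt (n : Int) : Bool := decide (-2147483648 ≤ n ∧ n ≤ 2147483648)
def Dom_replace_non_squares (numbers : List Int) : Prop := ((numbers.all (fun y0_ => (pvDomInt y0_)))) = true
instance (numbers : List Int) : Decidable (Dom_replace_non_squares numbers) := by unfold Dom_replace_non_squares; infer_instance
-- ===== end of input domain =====

-- B replaces A's per-element scan of all candidates 0..n with one precomputed set of squares up to max(numbers) and a single membership pass (faster; return value only — both mutate the list in place in Python).


-- ===== PORT A =====
def replace_non_squares (numbers : List Int) : List Int :=
  (PySem.List.pyRange 0 (numbers.length : Int) 1).foldl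
    (fun nums index =>
      -- is_square = False; for value in range(numbers[index] + 1): if value*value == numbers[index]: is_square = True
      let is_square :=
        (PySem.List.pyRange 0 (PySem.List.pyGetD nums index 0 + 1) 1).foldl
          (fun b v => if v * v == PySem.List.pyGetD nums index 0 then true else b) false
      if !is_square then PySem.List.pySetD nums index (-1) else nums)
    numbers

-- ===== PORT B =====
-- while i * i <= m: squares.add(i * i); i += 1
def pvBuildSquares (m : Int) (i : Nat) (s : PySem.Set Int) : PySem.Set Int :=
  if (i : Int) * (i : Int) ≤ m then
    pvBuildSquares m (i + 1) (PySem.Set.add s ((i : Int) * (i : Int)))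
  else s
  termination_by (m + 1 - (i : Int)).toNat
  decreasing_by
    have h1 : (i : Int) ≤ (i : Int) * (i : Int) := by nlinarith [Int.natCast_nonneg i]
    omega

def replace_non_squares_alt (numbers : List Int) : List Int :=
  match PySem.List.max? numbers (fun x => x) with
  | none => numbers                               -- if not numbers: return numbers
  | some m =>
    let squares := pvBuildSquares m 0 PySem.Set.empty
    numbers.map (fun x => if PySem.Set.contains squares x then x else -1)

-- ===== PRECONDITION & SPEC =====
def Spec_replace_non_squares (numbers : List Int) (out : List Int) : Prop := out = replace_non_squares_alt numbers
instance (numbers : List Int) (out : List Int) : Decidable (Spec_replace_non_squares numbers out) := by unfold Spec_replace_non_squares; infer_instance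

-- ===== CLAIM (what is proved, stated in full; the proofs are below) =====
def Claim_equal_replace_non_squares : Prop := ∀ (numbers : List Int), Dom_replace_non_squares numbers → Spec_replace_non_squares numbers (replace_non_squares numbers)

-- ===== LEMMAS AND PROOFS =====

-- A's inner loop on a value n, and A's per-element result
def pvIsSquareA (n : Int) : Bool :=
  (PySem.List.pyRange 0 (n + 1) 1).foldl (fun b v => if v * v == n then true else b) false

def pvStepA (n : Int) : Int := if !pvIsSquareA n then -1 else n

lemma pvFoldOr (n : Int) (l : List Int) (b : Bool) :
    l.foldl (fun b v => if v * v == n then true else b) b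
      = (b || l.any (fun v => v * v == n)) := by
  induction l generalizing b with
  | nil => simp
  | cons x t ih =>
      simp only [List.foldl_cons, List.any_cons, ih]
      by_cases h : x * x == n <;> simp [h]

lemma pvIsSquareA_iff (n : Int) :
    pvIsSquareA n = true ↔ ∃ v : Int, 0 ≤ v ∧ v ≤ n ∧ v * v = n := by
  unfold pvIsSquareA
  rw [pvFoldOr]
  simp only [Bool.false_or, List.any_eq_true, PySem.List.mem_pyRange_one, beq_iff_eq]
  constructor
  · rintro ⟨v, ⟨h0, h1⟩, h2⟩; exact ⟨v, h0, by omega, h2⟩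
  · rintro ⟨v, h0, h1, h2⟩; exact ⟨v, ⟨h0, by omega⟩, h2⟩

lemma pvSq_mono (i j : Nat) (h : i ≤ j) : ((i : Int) * (i : Int)) ≤ ((j : Int) * (j : Int)) := by
  have : (i : Int) ≤ (j : Int) := by exact_mod_cast h
  nlinarith [Int.natCast_nonneg i, Int.natCast_nonneg j]

lemma pvSelf_le_sq (i : Nat) : (i : Int) ≤ (i : Int) * (i : Int) := by
  nlinarith [Int.natCast_nonneg i]

lemma pvMem_buildSquares_aux (fuel : Nat) : ∀ (m : Int) (i : Nat) (s : PySem.Set Int) (x : Int),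
    (m + 1 - (i : Int)).toNat ≤ fuel →
    (x ∈ pvBuildSquares m i s ↔
      x ∈ s ∨ ∃ j : Nat, i ≤ j ∧ (j : Int) * (j : Int) ≤ m ∧ (j : Int) * (j : Int) = x) := by
  induction fuel with
  | zero =>
      intro m i s x hf
      have hni : ¬ ((i : Int) * (i : Int) ≤ m) := by
        have := pvSelf_le_sq i
        omega
      rw [pvBuildSquares, if_neg hni]
      constructor
      · exact Or.inl
      · rintro (hs | ⟨j, hj, hjm, _⟩)
        · exact hs
        · exact absurd hjm (by have := pvSq_mono i j hj; omega)
  | succ f ih =>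
      intro m i s x hf
      by_cases h : (i : Int) * (i : Int) ≤ m
      · rw [pvBuildSquares, if_pos h]
        have hfuel : (m + 1 - ((i + 1 : Nat) : Int)).toNat ≤ f := by
          have := pvSelf_le_sq i
          push_cast
          omega
        rw [ih m (i + 1) _ x hfuel, PySem.Set.mem_add]
        constructor
        · rintro (⟨hs | he⟩ | ⟨j, hj, hjm, hjx⟩)
          · exact Or.inl hs
          · exact Or.inr ⟨i, le_refl _, h, he.symm⟩
          · exact Or.inr ⟨j, by omega, hjm, hjx⟩
        · rintro (hs | ⟨j, hj, hjm, hjx⟩)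
          · exact Or.inl (Or.inl hs)
          · rcases Nat.eq_or_lt_of_le hj with rfl | hlt
            · exact Or.inl (Or.inr hjx.symm)
            · exact Or.inr ⟨j, by omega, hjm, hjx⟩
      · rw [pvBuildSquares, if_neg h]
        constructor
        · exact Or.inl
        · rintro (hs | ⟨j, hj, hjm, _⟩)
          · exact hs
          · exact absurd hjm (by have := pvSq_mono i j hj; omega)

lemma pvMem_buildSquares (m : Int) (i : Nat) (s : PySem.Set Int) (x : Int) :
    x ∈ pvBuildSquares m i s ↔
      x ∈ s ∨ ∃ j : Nat, i ≤ j ∧ (j : Int) * (j : Int) ≤ m ∧ (j : Int) * (j : Int) = x :=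
  pvMem_buildSquares_aux _ m i s x (le_refl _)

-- per-element agreement, assuming the element is bounded by the maximum
lemma pvStep_agree (m x : Int) (hxm : x ≤ m) :
    pvStepA x = (if PySem.Set.contains (pvBuildSquares m 0 PySem.Set.empty) x then x else -1) := by
  have hmem : x ∈ pvBuildSquares m 0 PySem.Set.empty ↔
      ∃ j : Nat, (j : Int) * (j : Int) ≤ m ∧ (j : Int) * (j : Int) = x := by
    rw [pvMem_buildSquares]
    simp [PySem.Set.empty]
  have hiff : pvIsSquareA x = true ↔ x ∈ pvBuildSquares m 0 PySem.Set.empty := by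
    rw [pvIsSquareA_iff, hmem]
    constructor
    · rintro ⟨v, h0, h1, h2⟩
      refine ⟨v.toNat, ?_, ?_⟩ <;> rw [Int.toNat_of_nonneg h0] <;> omega
    · rintro ⟨j, hjm, hjx⟩
      have h0 : (0 : Int) ≤ (j : Int) := Int.natCast_nonneg _
      refine ⟨(j : Int), h0, ?_, hjx⟩
      nlinarith
  unfold pvStepA
  by_cases h : x ∈ pvBuildSquares m 0 PySem.Set.empty
  · have ht := hiff.mpr h
    simp only [ht, Bool.not_true, Bool.false_eq_true, if_false]
    rw [if_pos ((PySem.Set.contains_iff _ _).mpr h)]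
  · have hf : pvIsSquareA x = false := by
      cases hb : pvIsSquareA x
      · rfl
      · exact absurd (hiff.mp hb) h
    simp only [hf, Bool.not_false, if_true]
    rw [if_neg (by
      intro hb
      exact absurd ((PySem.Set.contains_iff _ _).mp hb) h)]

-- A's index loop over pre ++ post, having already processed pre, maps pvStepA over post
lemma pvLoopA (post pre : List Int) :
    (PySem.List.pyRange (pre.length : Int) ((pre.length + post.length : Nat) : Int) 1).foldl
      (fun nums index =>
        let is_square :=
          (PySem.List.pyRange 0 (PySem.List.pyGetD nums index 0 + 1) 1).foldl
            (fun b v => if v * v == PySem.List.pyGetD nums index 0 then true else b) false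
        if !is_square then PySem.List.pySetD nums index (-1) else nums)
      (pre ++ post)
    = pre ++ post.map pvStepA := by
  induction post generalizing pre with
  | nil => simp [PySem.List.pyRange_one_eq_nil]
  | cons n rest ih =>
      have hlt : (pre.length : Int) < ((pre.length + (n :: rest).length : Nat) : Int) := by
        simp only [List.length_cons]
        omega
      rw [PySem.List.pyRange_one_cons hlt, List.foldl_cons]
      have hget : PySem.List.pyGetD (pre ++ n :: rest) (pre.length : Int) 0 = n := by
        rw [PySem.List.pyGetD_natCast]
        simp
      have hset : PySem.List.pySetD (pre ++ n :: rest) (pre.length : Int) (-1)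
          = pre ++ [(-1 : Int)] ++ rest := by
        rw [PySem.List.pySetD_natCast]
        rw [List.set_append_right _ _ (le_refl _)]
        simp
      simp only [hget]
      by_cases hsq : pvIsSquareA n
      · have : (PySem.List.pyRange 0 (n + 1) 1).foldl
            (fun b v => if v * v == n then true else b) false = true := hsq
        simp only [this, Bool.not_true, Bool.false_eq_true, if_false]
        have heq : pre ++ n :: rest = (pre ++ [n]) ++ rest := by simp
        rw [heq]
        have := ih (pre ++ [n])
        simp only [List.length_append, List.length_cons, List.length_nil] at this ⊢
        have harg : (pre.length : Int) + 1 = ((pre.length + 1 : Nat) : Int) := by push_cast; ring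
        rw [show pre.length + (rest.length + 1) = pre.length + 1 + rest.length by omega, harg, this]
        simp [pvStepA, hsq]
      · have : (PySem.List.pyRange 0 (n + 1) 1).foldl
            (fun b v => if v * v == n then true else b) false = false := by
          cases hb : pvIsSquareA n
          · exact hb
          · exact absurd hb (by simp [hsq])
        simp only [this, Bool.not_false, if_true, hset]
        have heq : pre ++ [(-1 : Int)] ++ rest = (pre ++ [(-1 : Int)]) ++ rest := by simp
        rw [heq]
        have := ih (pre ++ [(-1 : Int)])
        simp only [List.length_append, List.length_cons, List.length_nil] at this ⊢
        have harg : (pre.length : Int) + 1 = ((pre.length + 1 : Nat) : Int) := by push_cast; ring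
        rw [show pre.length + (rest.length + 1) = pre.length + 1 + rest.length by omega, harg, this]
        simp [pvStepA, hsq]

lemma pvA_eq_map (numbers : List Int) :
    replace_non_squares numbers = numbers.map pvStepA := by
  unfold replace_non_squares
  have := pvLoopA numbers []
  simpa using this

-- ===== VERDICT (by name: the statement is the Claim_ definition above) =====
theorem replace_non_squares_spec : Claim_equal_replace_non_squares := by
  intro numbers _
  unfold Spec_replace_non_squares
  rw [pvA_eq_map]
  unfold replace_non_squares_alt
  cases hm : PySem.List.max? numbers (fun x => x) with
  | none =>
      have : numbers = [] := (PySem.List.max?_eq_none_iff _ _).mp hm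
      simp [this]
  | some m =>
      apply List.map_congr_left
      intro x hx
      exact pvStep_agree m x (PySem.List.max?_isMax hm x hx)
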